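-- pv_equiv track=rewrite | github.com/sapnamolshajahan/Maravilla-Cleaner | modules/common/operations_stocktake/utils/serial_numbers.py | compute_serial_format
-- ===== SOURCE A (Python) =====
-- def compute_serial_format(serial_number):
--     """
--     Compute the format-string of a serial number.
--
--     Expectation is that the last numeric segment in the serial-number will be the mutable part.
--
--     :param serial_number:
--     :return:
--     """
--     n_count = 0
--     n_done = False
--     result = ""
--
--     ixs = list(range(0, len(serial_number)))
--     ixs.reverse()
--     for ix in ixs:
--         if n_done:
--             result = serial_number[ix] + result
--             continue
--         if serial_number[ix].isdigit():
--             n_count = n_count + 1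
--             continue
--         if n_count:
--             result = serial_number[ix] + "{:0" + str(n_count) + "d}" + result
--             n_done = True
--             continue
--         # trailing non-numeric
--         result = serial_number[ix] + result
--
--     if n_count and not n_done:
--         result = "{:0" + str(n_count) + "d}" + result
--
--     return result
-- ===== SOURCE B (Python) =====
-- def compute_serial_format(serial_number):
--     """Single left-to-right pass: track the current digit run and remember the
--     last completed one, then splice the format spec in by slicing."""
--     best = None        # (start, end) of the last digit run seen so far
--     run_start = None   # start of the run currently being extended, if any
--     for i, ch in enumerate(serial_number):
--         if ch.isdigit():
--             if run_start is None:
--                 run_start = i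
--             best = (run_start, i + 1)
--         else:
--             run_start = None
--     if best is None:
--         return serial_number
--     a, b = best
--     return serial_number[:a] + "{:0" + str(b - a) + "d}" + serial_number[b:]
-- ===== Notes on version B (the rewrite author's own statement) =====
-- stated objective: faster
-- what changed: Replaced A's right-to-left character state machine (n_done/n_count flags, building the result by repeated string prepending) with a single left-to-right pass that records the last digit run as an index pair and splices the format spec in with three slices.
import Mathlib
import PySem

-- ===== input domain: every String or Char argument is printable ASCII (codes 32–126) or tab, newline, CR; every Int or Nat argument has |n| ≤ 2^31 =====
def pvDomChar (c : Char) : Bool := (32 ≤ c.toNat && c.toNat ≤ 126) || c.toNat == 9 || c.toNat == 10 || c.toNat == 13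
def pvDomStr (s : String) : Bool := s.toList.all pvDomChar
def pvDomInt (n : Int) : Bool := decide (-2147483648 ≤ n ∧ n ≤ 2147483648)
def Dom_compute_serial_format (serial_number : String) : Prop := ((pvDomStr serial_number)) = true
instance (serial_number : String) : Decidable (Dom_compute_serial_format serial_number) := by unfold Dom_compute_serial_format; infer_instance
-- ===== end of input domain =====

-- B replaces A's right-to-left state machine with a single left-to-right pass that records
-- the last digit run as an index pair and splices the format spec in by slicing.

-- ===== PORT A =====
-- the literal pieces "{:0" + str(n) + "d}" both Pythons build
def csfFmt (n : Nat) : List Char := "{:0".toList ++ PySem.Int.toChars (n : Int) ++ "d}".toList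

-- A's for-loop over the reversed indices; state (n_count, n_done, result)
def csfLoopA : List Char → Nat → Bool → List Char → Nat × Bool × List Char
  | [], n, dn, res => (n, dn, res)
  | c :: rest, n, dn, res =>
    if dn then csfLoopA rest n dn (c :: res)
    else if PySem.Chars.isdigit c then csfLoopA rest (n + 1) dn res
    else if n ≠ 0 then csfLoopA rest n true (c :: (csfFmt n ++ res))
    else csfLoopA rest n dn (c :: res)

def compute_serial_format (serial_number : String) : String :=
  let st := csfLoopA serial_number.toList.reverse 0 false []
  if st.1 ≠ 0 ∧ st.2.1 = false then String.ofList (csfFmt st.1 ++ st.2.2)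
  else String.ofList st.2.2

-- ===== PORT B =====
-- B's single forward pass: i = position, rs = start of the current digit run, best = last run
def csfScanB : List Char → Nat → Option Nat → Option (Nat × Nat) → Option (Nat × Nat)
  | [], _, _, best => best
  | c :: rest, i, rs, best =>
    if PySem.Chars.isdigit c then
      csfScanB rest (i + 1) (some (rs.getD i)) (some (rs.getD i, i + 1))
    else csfScanB rest (i + 1) none best

def compute_serial_format_alt (serial_number : String) : String :=
  match csfScanB serial_number.toList 0 none none with
  | none => serial_number
  | some (a, b) =>
      String.ofList (serial_number.toList.take a ++ csfFmt (b - a) ++ serial_number.toList.drop b)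

-- ===== PRECONDITION & SPEC =====
def Spec_compute_serial_format (serial_number : String) (out : String) : Prop := out = compute_serial_format_alt serial_number
instance (serial_number : String) (out : String) : Decidable (Spec_compute_serial_format serial_number out) := by unfold Spec_compute_serial_format; infer_instance

-- ===== CLAIM (what is proved, stated in full; the proofs are below) =====
def Claim_equal_compute_serial_format : Prop := ∀ (serial_number : String), Dom_compute_serial_format serial_number → Spec_compute_serial_format serial_number (compute_serial_format serial_number)

-- ===== LEMMAS AND PROOFS =====

-- one-step unfolding lemmas (kept as rw targets so unfolding stays controlled)
theorem csfLoopA_nil (n : Nat) (dn : Bool) (res : List Char) :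
    csfLoopA [] n dn res = (n, dn, res) := rfl

theorem csfLoopA_cons_false (c : Char) (rest : List Char) (n : Nat) (res : List Char) :
    csfLoopA (c :: rest) n false res =
      if PySem.Chars.isdigit c then csfLoopA rest (n + 1) false res
      else if n ≠ 0 then csfLoopA rest n true (c :: (csfFmt n ++ res))
      else csfLoopA rest n false (c :: res) := rfl

theorem csfScanB_cons (c : Char) (rest : List Char) (i : Nat) (rs : Option Nat)
    (best : Option (Nat × Nat)) :
    csfScanB (c :: rest) i rs best =
      if PySem.Chars.isdigit c then
        csfScanB rest (i + 1) (some (rs.getD i)) (some (rs.getD i, i + 1))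
      else csfScanB rest (i + 1) none best := rfl

-- A's loop once n_done is set: the remaining characters are prepended verbatim
theorem csfLoopA_done (l : List Char) : ∀ (n : Nat) (res : List Char),
    csfLoopA l n true res = (n, true, l.reverse ++ res) := by
  induction l with
  | nil => intro n res; simp [csfLoopA]
  | cons c rest ih => intro n res; simp [csfLoopA, ih]

-- A's loop over trailing non-digits (n_count = 0): they are prepended verbatim
theorem csfLoopA_nd (t : List Char) (h : ∀ c ∈ t, PySem.Chars.isdigit c = false) :
    ∀ (l res : List Char), csfLoopA (t ++ l) 0 false res = csfLoopA l 0 false (t.reverse ++ res) := by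
  induction t with
  | nil => intro l res; simp
  | cons c rest ih =>
      intro l res
      have hc : PySem.Chars.isdigit c = false := h c (by simp)
      have hr : ∀ c ∈ rest, PySem.Chars.isdigit c = false := fun c hm => h c (by simp [hm])
      simp [csfLoopA, hc, ih hr]

-- A's loop over a digit block: it only increments n_count
theorem csfLoopA_d (d : List Char) (h : ∀ c ∈ d, PySem.Chars.isdigit c = true) :
    ∀ (n : Nat) (l res : List Char), csfLoopA (d ++ l) n false res = csfLoopA l (n + d.length) false res := by
  induction d with
  | nil => intro n l res; simp
  | cons c rest ih =>
      intro n l res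
      have hc : PySem.Chars.isdigit c = true := h c (by simp)
      have hr : ∀ c ∈ rest, PySem.Chars.isdigit c = true := fun c hm => h c (by simp [hm])
      simp [csfLoopA, hc, ih hr]
      ring_nf

-- B's scan over non-digits: state resets, best is unchanged
theorem csfScanB_nd (l : List Char) (h : ∀ c ∈ l, PySem.Chars.isdigit c = false) :
    ∀ (i : Nat) (rs : Option Nat) (best : Option (Nat × Nat)), csfScanB l i rs best = best := by
  induction l with
  | nil => intro i rs best; simp [csfScanB]
  | cons c rest ih =>
      intro i rs best
      have hc : PySem.Chars.isdigit c = false := h c (by simp)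
      have hr : ∀ c ∈ rest, PySem.Chars.isdigit c = false := fun c hm => h c (by simp [hm])
      simp [csfScanB, hc, ih hr]

-- B's scan through a digit block extends the current run
theorem csfScanB_d (d : List Char) (h : ∀ c ∈ d, PySem.Chars.isdigit c = true) :
    ∀ (l : List Char) (i s : Nat),
      csfScanB (d ++ l) i (some s) (some (s, i)) = csfScanB l (i + d.length) (some s) (some (s, i + d.length)) := by
  induction d with
  | nil => intro l i s; simp
  | cons c rest ih =>
      intro l i s
      have hc : PySem.Chars.isdigit c = true := h c (by simp)
      have hr : ∀ c ∈ rest, PySem.Chars.isdigit c = true := fun c hm => h c (by simp [hm])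
      simp only [List.cons_append, csfScanB_cons, hc, if_pos, Option.getD_some]
      rw [ih hr]
      rw [show i + 1 + rest.length = i + (c :: rest).length by simp; ring]

-- B's scan composes across a boundary whose left part ends in a non-digit
theorem csfScanB_comp (P : List Char) :
    ∀ (_ : P ≠ []) (_ : ∀ c, P.getLast? = some c → PySem.Chars.isdigit c = false)
      (L : List Char) (i : Nat) (rs : Option Nat) (best : Option (Nat × Nat)),
      csfScanB (P ++ L) i rs best = csfScanB L (i + P.length) none (csfScanB P i rs best) := by
  induction P with
  | nil => intro hne; exact absurd rfl hne
  | cons c P' ih =>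
      intro _ hlast L i rs best
      cases P' with
      | nil =>
          have hc : PySem.Chars.isdigit c = false := hlast c (by simp)
          simp [csfScanB, hc]
      | cons c' P'' =>
          have hlast' : ∀ x, (c' :: P'').getLast? = some x → PySem.Chars.isdigit x = false := by
            intro x hx
            exact hlast x (by rw [List.getLast?_cons_cons]; exact hx)
          rw [List.cons_append]
          conv_lhs => rw [csfScanB_cons]
          conv_rhs => rw [csfScanB_cons]
          by_cases hc : PySem.Chars.isdigit c = true
          · rw [if_pos hc, if_pos hc, ih (by simp) hlast']
            rw [show i + 1 + (c' :: P'').length = i + (c :: c' :: P'').length by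
              simp [List.length_cons]; ring]
          · rw [if_neg hc, if_neg hc, ih (by simp) hlast']
            rw [show i + 1 + (c' :: P'').length = i + (c :: c' :: P'').length by
              simp [List.length_cons]; ring]

-- head of a dropWhile fails the predicate
theorem dropWhile_head_false {p : Char → Bool} {l : List Char} {c : Char} {l' : List Char}
    (h : l.dropWhile p = c :: l') : p c = false := by
  have := List.head?_dropWhile_not p l
  rw [h] at this
  simpa using this

-- the reversed string splits as (trailing non-digits) ++ (last digit run) ++ (rest)
theorem csf_decomp (l : List Char) :
    ∃ t d r, l = t ++ d ++ r ∧ (∀ c ∈ t, PySem.Chars.isdigit c = false) ∧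
      (∀ c ∈ d, PySem.Chars.isdigit c = true) ∧ (d = [] → r = []) ∧
      (∀ c r', r = c :: r' → PySem.Chars.isdigit c = false) := by
  refine ⟨l.takeWhile (fun c => !PySem.Chars.isdigit c),
    (l.dropWhile (fun c => !PySem.Chars.isdigit c)).takeWhile (fun c => PySem.Chars.isdigit c),
    (l.dropWhile (fun c => !PySem.Chars.isdigit c)).dropWhile (fun c => PySem.Chars.isdigit c),
    ?_, ?_, ?_, ?_, ?_⟩
  · rw [List.append_assoc, List.takeWhile_append_dropWhile, List.takeWhile_append_dropWhile]
  · intro c hc; simpa using List.mem_takeWhile_imp hc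
  · intro c hc; exact List.mem_takeWhile_imp hc
  · intro hd
    cases hu : l.dropWhile (fun c => !PySem.Chars.isdigit c) with
    | nil => rfl
    | cons c u' =>
        have hcd : PySem.Chars.isdigit c = true := by
          simpa using dropWhile_head_false hu
        rw [hu] at hd
        simp [List.takeWhile, hcd] at hd
  · intro c r' hr; exact dropWhile_head_false hr

theorem compute_serial_format_eq_alt (s : String) :
    compute_serial_format s = compute_serial_format_alt s := by
  obtain ⟨t, d, r, hrev, htnd, hdd, hdr, hrhead⟩ := csf_decomp s.toList.reverse
  have hchars : s.toList = r.reverse ++ d.reverse ++ t.reverse := by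
    have h1 : s.toList = (t ++ d ++ r).reverse := by
      rw [← hrev, List.reverse_reverse]
    simpa using h1
  cases d with
  | nil =>
      have hrnil : r = [] := hdr rfl
      subst hrnil
      have hrevt : s.toList.reverse = t := by simpa using hrev
      have hct : s.toList = t.reverse := by simpa using hchars
      have hallnd : ∀ c ∈ s.toList, PySem.Chars.isdigit c = false := by
        intro c hc
        exact htnd c (by rw [← hrevt]; simpa using hc)
      have hB : csfScanB s.toList 0 none none = none :=
        csfScanB_nd s.toList hallnd 0 none none
      have hA : csfLoopA s.toList.reverse 0 false [] = (0, false, t.reverse) := by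
        rw [hrevt]
        have h := csfLoopA_nd t htnd [] []
        rw [List.append_nil] at h
        rw [h, csfLoopA_nil, List.append_nil]
      simp only [compute_serial_format, compute_serial_format_alt, hA, hB]
      rw [if_neg (by simp)]
      rw [← hct, String.ofList_toList]
  | cons c0 d' =>
      have hdne : (c0 :: d') ≠ ([] : List Char) := by simp
      have hdlenpos : (c0 :: d').length ≠ 0 := by simp
      -- ---- A side ----
      have hstepA : csfLoopA s.toList.reverse 0 false [] =
          csfLoopA r (c0 :: d').length false t.reverse := by
        rw [hrev, List.append_assoc, csfLoopA_nd t htnd, csfLoopA_d _ hdd]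
        rw [List.append_nil, Nat.zero_add]
      have hA : compute_serial_format s =
          String.ofList (r.reverse ++ csfFmt (c0 :: d').length ++ t.reverse) := by
        cases r with
        | nil =>
            simp only [compute_serial_format, hstepA, csfLoopA_nil]
            rw [if_pos ⟨hdlenpos, trivial⟩]
            simp
        | cons ch r' =>
            have hch : PySem.Chars.isdigit ch = false := hrhead ch r' rfl
            have hloop : csfLoopA (ch :: r') (c0 :: d').length false t.reverse =
                ((c0 :: d').length, true,
                  r'.reverse ++ ch :: (csfFmt (c0 :: d').length ++ t.reverse)) := by
              rw [csfLoopA_cons_false, if_neg (by simp [hch]), if_pos hdlenpos, csfLoopA_done]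
            simp only [compute_serial_format, hstepA, hloop]
            rw [if_neg (by simp)]
            simp
      -- ---- B side ----
      have hdrev : ∀ c ∈ (c0 :: d').reverse, PySem.Chars.isdigit c = true := by
        intro c hc; exact hdd c (List.mem_reverse.mp hc)
      have htrev : ∀ c ∈ t.reverse, PySem.Chars.isdigit c = false := by
        intro c hc; exact htnd c (List.mem_reverse.mp hc)
      have hmid : ∀ (i : Nat) (best : Option (Nat × Nat)),
          csfScanB ((c0 :: d').reverse ++ t.reverse) i none best =
            some (i, i + (c0 :: d').length) := by
        intro i best
        cases hdrc : (c0 :: d').reverse with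
        | nil => exact absurd (by simpa using congrArg List.length hdrc) (by omega)
        | cons ch D2 =>
            have hch : PySem.Chars.isdigit ch = true := hdrev ch (by rw [hdrc]; simp)
            have hD2 : ∀ c ∈ D2, PySem.Chars.isdigit c = true := by
              intro c hc; exact hdrev c (by rw [hdrc]; simp [hc])
            have hlen : D2.length + 1 = (c0 :: d').length := by
              have := congrArg List.length hdrc
              simpa [Nat.add_comm] using this.symm
            rw [List.cons_append, csfScanB_cons, if_pos hch, Option.getD_none]
            rw [csfScanB_d D2 hD2, csfScanB_nd t.reverse htrev]
            rw [show i + 1 + D2.length = i + (c0 :: d').length by omega]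
      have hB : csfScanB s.toList 0 none none =
          some (r.length, r.length + (c0 :: d').length) := by
        rw [hchars, List.append_assoc]
        cases r with
        | nil =>
            have h := hmid 0 none
            rw [Nat.zero_add] at h
            simpa using h
        | cons ch r' =>
            have hch : PySem.Chars.isdigit ch = false := hrhead ch r' rfl
            have hlast : ∀ c, (ch :: r').reverse.getLast? = some c →
                PySem.Chars.isdigit c = false := by
              intro c hc
              rw [List.getLast?_reverse] at hc
              simp at hc
              rw [← hc]; exact hch
            rw [csfScanB_comp (ch :: r').reverse (by simp) hlast, hmid]
            simp
      have htake : s.toList.take r.length = r.reverse := by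
        rw [hchars, List.append_assoc, show r.length = r.reverse.length by simp,
          List.take_left]
      have hdrop : s.toList.drop (r.length + (c0 :: d').length) = t.reverse := by
        rw [hchars, show r.length + (c0 :: d').length = (r.reverse ++ (c0 :: d').reverse).length
          by simp, List.drop_left]
      rw [hA, compute_serial_format_alt, hB]
      simp only [Nat.add_sub_cancel_left, htake, hdrop]

-- ===== VERDICT (by name: the statement is the Claim_ definition above) =====
theorem compute_serial_format_spec : Claim_equal_compute_serial_format := by
  intro s _
  unfold Spec_compute_serial_format
  exact compute_serial_format_eq_alt s
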